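-- pv_equiv track=rewrite | github.com/andreignatius/ChordAnalysis | chord_recognition.py | get_intervals_from_bass
-- ===== SOURCE A (Python) =====
-- def get_intervals_from_bass(midi_notes: list[int]) -> tuple[int, list[int]]:
--     """
--     Get intervals relative to the bass (lowest) note.
--
--     Returns (bass_midi, intervals_in_semitones)
--     """
--     if not midi_notes:
--         return 0, []
--
--     sorted_notes = sorted(midi_notes)
--     bass = sorted_notes[0]
--
--     # Get unique pitch classes relative to bass
--     intervals = set()
--     for note in sorted_notes:
--         interval = (note - bass) % 12
--         intervals.add(interval)
--
--     return bass, sorted(intervals)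
-- ===== SOURCE B (Python) =====
-- def get_intervals_from_bass(midi_notes: list[int]) -> tuple[int, list[int]]:
--     if not midi_notes:
--         return 0, []
--     # one pass: track the minimum and a 12-bit mask of absolute pitch classes
--     bass = midi_notes[0]
--     mask = 1 << (bass % 12)
--     for n in midi_notes[1:]:
--         if n < bass:
--             bass = n
--         mask |= 1 << (n % 12)
--     # rotate the pitch-class mask so bit 0 corresponds to the bass class
--     r = bass % 12
--     rotated = ((mask >> r) | (mask << (12 - r))) & 0xFFF
--     # emit set bits in ascending order by stripping the lowest set bit
--     intervals = []
--     while rotated: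
--         intervals.append((rotated & -rotated).bit_length() - 1)
--         rotated &= rotated - 1
--     return bass, intervals
-- ===== Notes on version B (the rewrite author's own statement) =====
-- stated objective: faster
-- what changed: Replaces sort+set+sort with a single fused pass that tracks the minimum and a 12-bit bitmask of absolute pitch classes, then rotates the mask by bass%12 and emits intervals in ascending order by stripping lowest set bits - no sorting and no set at all.
import Mathlib
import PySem

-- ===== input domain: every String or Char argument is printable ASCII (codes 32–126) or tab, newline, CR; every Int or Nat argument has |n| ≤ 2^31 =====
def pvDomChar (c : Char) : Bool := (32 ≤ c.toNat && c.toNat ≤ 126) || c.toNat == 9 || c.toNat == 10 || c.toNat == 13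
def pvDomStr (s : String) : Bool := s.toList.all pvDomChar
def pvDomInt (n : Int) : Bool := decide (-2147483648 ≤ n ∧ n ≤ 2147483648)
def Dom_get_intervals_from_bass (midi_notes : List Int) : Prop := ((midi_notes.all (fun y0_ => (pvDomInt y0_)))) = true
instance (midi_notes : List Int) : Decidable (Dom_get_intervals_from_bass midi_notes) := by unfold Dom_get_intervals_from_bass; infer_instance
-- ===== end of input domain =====

-- B replaces sort+set+sort by one fused pass (minimum + 12-bit absolute pitch-class bitmask), a bit rotation of the mask by bass%12, and lowest-set-bit extraction.

-- ===== PORT A =====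
def get_intervals_from_bass (midi_notes : List Int) : Int × List Int :=
  if midi_notes = [] then (0, [])
  else
    let sorted_notes := PySem.List.sorted midi_notes (fun x => x) false
    let bass := PySem.List.pyGetD sorted_notes 0 0
    let intervals : PySem.Set Int :=
      sorted_notes.foldl (fun s note => PySem.Set.add s (PySem.Int.mod (note - bass) 12)) PySem.Set.empty
    (bass, PySem.List.sorted intervals (fun x => x) false)

-- ===== PORT B =====
-- The mask in Source B is a Python int that is always nonnegative (built from 1<<k by |, >>, <<, & 0xFFF),
-- so it is ported as a Nat with Lean's Nat bit operations, which are exact for nonnegative Python ints.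
-- Source B's while-loop strips lowest set bits; fuel 12 covers every mask `& 0xFFF` (< 2^12), and the loop
-- body is exact: `m & -m` (lowest set bit) = m ^^^ (m &&& (m-1)) for m > 0, and bit_length-1 of a power
-- of two is Nat.log2.
def pvStripBits (fuel : Nat) (m : Nat) : List Int :=
  match fuel with
  | 0 => []
  | fuel + 1 =>
    if m = 0 then []
    else (Int.ofNat (Nat.log2 (m ^^^ (m &&& (m - 1))))) :: pvStripBits fuel (m &&& (m - 1))

def get_intervals_from_bass_alt (midi_notes : List Int) : Int × List Int :=
  match midi_notes with
  | [] => (0, [])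
  | n0 :: rest =>
    let st := rest.foldl
      (fun (s : Int × Nat) n =>
        (if n < s.1 then n else s.1, s.2 ||| (1 <<< (PySem.Int.mod n 12).toNat)))
      (n0, 1 <<< (PySem.Int.mod n0 12).toNat)
    let bass := st.1
    let r := (PySem.Int.mod bass 12).toNat
    let rotated := ((st.2 >>> r) ||| (st.2 <<< (12 - r))) &&& 4095
    (bass, pvStripBits 12 rotated)

-- ===== PRECONDITION & SPEC =====
def Spec_get_intervals_from_bass (midi_notes : List Int) (out : Int × List Int) : Prop := out = get_intervals_from_bass_alt midi_notes
instance (midi_notes : List Int) (out : Int × List Int) : Decidable (Spec_get_intervals_from_bass midi_notes out) := by unfold Spec_get_intervals_from_bass; infer_instance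

-- ===== CLAIM (what is proved, stated in full; the proofs are below) =====
def Claim_equal_get_intervals_from_bass : Prop := ∀ (midi_notes : List Int), Dom_get_intervals_from_bass midi_notes → Spec_get_intervals_from_bass midi_notes (get_intervals_from_bass midi_notes)

-- ===== LEMMAS AND PROOFS =====

-- B's fused fold splits into its two independent components.
lemma fold_split (rest : List Int) (b0 : Int) (m0 : Nat) :
    rest.foldl
      (fun (s : Int × Nat) n =>
        (if n < s.1 then n else s.1, s.2 ||| (1 <<< (PySem.Int.mod n 12).toNat)))
      (b0, m0)
    = (rest.foldl (fun b n => if n < b then n else b) b0,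
       rest.foldl (fun m n => m ||| (1 <<< (PySem.Int.mod n 12).toNat)) m0) := by
  induction rest generalizing b0 m0 with
  | nil => rfl
  | cons n t ih => simp only [List.foldl_cons]; exact ih _ _

-- The min fold computes a minimum of n0 :: rest.
lemma fold_min_spec (rest : List Int) (b0 : Int) :
    (rest.foldl (fun b n => if n < b then n else b) b0) ∈ b0 :: rest ∧
    ∀ y ∈ b0 :: rest, rest.foldl (fun b n => if n < b then n else b) b0 ≤ y := by
  induction rest generalizing b0 with
  | nil => simp
  | cons n t ih =>
    simp only [List.foldl_cons]
    set b1 := if n < b0 then n else b0 with hb1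
    obtain ⟨hmem, hle⟩ := ih b1
    have h1 : b1 ≤ b0 := by rw [hb1]; split_ifs <;> omega
    have h2 : b1 ≤ n := by rw [hb1]; split_ifs <;> omega
    have hb0 : List.foldl (fun b n => if n < b then n else b) b1 t ≤ b1 :=
      hle b1 (List.mem_cons.mpr (Or.inl rfl))
    constructor
    · rcases List.mem_cons.mp hmem with h | h
      · rw [h, hb1]; split_ifs
        · exact List.mem_cons.mpr (Or.inr (List.mem_cons.mpr (Or.inl rfl)))
        · exact List.mem_cons.mpr (Or.inl rfl)
      · exact List.mem_cons.mpr (Or.inr (List.mem_cons.mpr (Or.inr h)))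
    · intro y hy
      rcases List.mem_cons.mp hy with h | h
      · subst h; omega
      · rcases List.mem_cons.mp h with h | h
        · subst h; omega
        · exact hle y (List.mem_cons.mpr (Or.inr h))

-- Bit i of the mask fold records whether some note has absolute pitch class i.
lemma fold_mask_testBit (rest : List Int) (m0 : Nat) (i : Nat) :
    ((rest.foldl (fun m n => m ||| (1 <<< (PySem.Int.mod n 12).toNat)) m0).testBit i)
      = (m0.testBit i || rest.any (fun n => decide ((PySem.Int.mod n 12).toNat = i))) := by
  induction rest generalizing m0 with
  | nil => simp
  | cons n t ih =>
    simp only [List.foldl_cons, List.any_cons]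
    rw [ih]
    have h1 : (m0 ||| (1 <<< (PySem.Int.mod n 12).toNat)).testBit i
        = (m0.testBit i || decide ((PySem.Int.mod n 12).toNat = i)) := by
      rw [Nat.testBit_or, Nat.shiftLeft_eq, one_mul, Nat.testBit_two_pow]
    rw [h1, Bool.or_assoc]

-- The mask fold stays below 2^12.
lemma fold_mask_lt (rest : List Int) (m0 : Nat) (h0 : m0 < 4096) :
    rest.foldl (fun m n => m ||| (1 <<< (PySem.Int.mod n 12).toNat)) m0 < 4096 := by
  induction rest generalizing m0 with
  | nil => exact h0
  | cons n t ih =>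
    simp only [List.foldl_cons]
    apply ih
    have hlt : (PySem.Int.mod n 12).toNat < 12 := by
      have h1 := PySem.Int.mod_nonneg n (b := 12) (by norm_num)
      have h2 := PySem.Int.mod_lt n (b := 12) (by norm_num)
      omega
    have : 1 <<< (PySem.Int.mod n 12).toNat < 4096 := by
      rw [Nat.shiftLeft_eq, one_mul]
      calc 2 ^ (PySem.Int.mod n 12).toNat < 2 ^ 12 := Nat.pow_lt_pow_right (by norm_num) hlt
        _ = 4096 := by norm_num
    exact Nat.or_lt_two_pow (n := 12) h0 this

-- Bit i of the rotated mask = bit (i + r) % 12 of the mask (r < 12, mask < 2^12, i < 12).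
lemma rotate_testBit (mask r i : Nat) (hm : mask < 4096) (hr : r < 12) (hi : i < 12) :
    (((mask >>> r) ||| (mask <<< (12 - r))) &&& 4095).testBit i = mask.testBit ((i + r) % 12) := by
  rw [Nat.testBit_and, Nat.testBit_or, Nat.testBit_shiftRight, Nat.testBit_shiftLeft]
  have h4095 : (4095 : Nat).testBit i = true := by
    have : (4095 : Nat) = 2 ^ 12 - 1 := by norm_num
    rw [this, Nat.testBit_two_pow_sub_one]; simpa using hi
  rw [h4095, Bool.and_true]
  by_cases hc : i + r < 12
  · have hmod : (i + r) % 12 = i + r := Nat.mod_eq_of_lt hc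
    have hge : decide (12 - r ≤ i) = false := by simp; omega
    rw [hmod, hge, Bool.false_and, Bool.or_false, Nat.add_comm]
  · have hhigh : mask.testBit (r + i) = false :=
      Nat.testBit_eq_false_of_lt (lt_of_lt_of_le hm (by
        calc (4096 : Nat) = 2 ^ 12 := by norm_num
          _ ≤ 2 ^ (r + i) := Nat.pow_le_pow_right (by norm_num) (by omega)))
    have hge : decide (12 - r ≤ i) = true := by simp; omega
    have hmod : (i + r) % 12 = i - (12 - r) := by omega
    rw [hhigh, Bool.false_or, hge, Bool.true_and, hmod]

-- Stripping lowest set bits of a 12-bit mask lists its set bit indices in ascending order.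
set_option maxRecDepth 4000 in
set_option maxHeartbeats 4000000 in
lemma stripBits_eq_filter_aux : ∀ a < 64, ∀ b < 64,
    pvStripBits 12 (a * 64 + b) = ((List.range 12).filter (fun i => (a * 64 + b).testBit i)).map Int.ofNat := by
  decide

lemma stripBits_eq_filter : ∀ m < 4096,
    pvStripBits 12 m = ((List.range 12).filter (fun i => m.testBit i)).map Int.ofNat := by
  intro m hm
  have h := stripBits_eq_filter_aux (m / 64) (by omega) (m % 64) (by omega)
  have hmeq : m / 64 * 64 + m % 64 = m := by omega
  rwa [hmeq] at h

-- The interval of a note relative to the bass, expressed through absolute pitch classes.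
lemma interval_class (n bass : Int) (i : Nat) (hi : i < 12) :
    (PySem.Int.mod (n - bass) 12 = (i : Int))
      ↔ (PySem.Int.mod n 12).toNat = (i + (PySem.Int.mod bass 12).toNat) % 12 := by
  rw [PySem.Int.mod_eq_emod_of_pos (a := n - bass) (by norm_num),
      PySem.Int.mod_eq_emod_of_pos (a := n) (by norm_num),
      PySem.Int.mod_eq_emod_of_pos (a := bass) (by norm_num)]
  omega

-- ===== VERDICT (by name: the statement is the Claim_ definition above) =====
theorem get_intervals_from_bass_spec : Claim_equal_get_intervals_from_bass := by
  unfold Claim_equal_get_intervals_from_bass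
  intro xs _
  unfold Spec_get_intervals_from_bass get_intervals_from_bass get_intervals_from_bass_alt
  match xs with
  | [] => rfl
  | n0 :: rest =>
    simp only [if_neg (List.cons_ne_nil n0 rest), fold_split]
    -- notation
    set m : Int := rest.foldl (fun b n => if n < b then n else b) n0 with hmdef
    set mask : Nat := rest.foldl (fun m n => m ||| (1 <<< (PySem.Int.mod n 12).toNat))
      (1 <<< (PySem.Int.mod n0 12).toNat) with hmaskdef
    set r : Nat := (PySem.Int.mod m 12).toNat with hrdef
    set rotated : Nat := ((mask >>> r) ||| (mask <<< (12 - r))) &&& 4095 with hrotdef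
    obtain ⟨hmmem, hmmin⟩ := fold_min_spec rest n0
    rw [← hmdef] at hmmem hmmin
    -- A's bass is the head of the sorted list; show it equals m
    obtain ⟨a0, t, hs⟩ : ∃ a0 t, PySem.List.sorted (n0 :: rest) (fun x => x) false = a0 :: t := by
      cases h : PySem.List.sorted (n0 :: rest) (fun x => x) false with
      | nil => exact absurd ((PySem.List.sorted_eq_nil_iff (n0 :: rest) _ _).mp h) (List.cons_ne_nil n0 rest)
      | cons a b => exact ⟨a, b, rfl⟩
    have ha0mem : a0 ∈ n0 :: rest := by
      have : a0 ∈ PySem.List.sorted (n0 :: rest) (fun x => x) false := by rw [hs]; simp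
      exact (PySem.List.mem_sorted _ _ _ a0).mp this
    have ha0min : ∀ y ∈ n0 :: rest, a0 ≤ y := PySem.List.key_head_sorted_le (n0 :: rest) (fun x => x) hs
    have hbass : a0 = m := le_antisymm (ha0min m hmmem) (hmmin a0 ha0mem)
    have hbassA : PySem.List.pyGetD (PySem.List.sorted (n0 :: rest) (fun x => x) false) 0 0 = m := by
      rw [hs, PySem.List.pyGetD_zero_cons, hbass]
    rw [hbassA]
    simp only [Prod.mk.injEq]
    refine ⟨trivial, ?_⟩
    -- interval function
    set f : Int → Int := fun n => PySem.Int.mod (n - m) 12 with hfdef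
    have hf : ∀ n, 0 ≤ f n ∧ f n < 12 :=
      fun n => ⟨PySem.Int.mod_nonneg _ (by norm_num), PySem.Int.mod_lt _ (by norm_num)⟩
    -- facts about the masks
    have hmasklt : mask < 4096 := by
      rw [hmaskdef]
      apply fold_mask_lt
      have : (PySem.Int.mod n0 12).toNat < 12 := by
        have h1 := PySem.Int.mod_nonneg n0 (b := 12) (by norm_num)
        have h2 := PySem.Int.mod_lt n0 (b := 12) (by norm_num)
        omega
      rw [Nat.shiftLeft_eq, one_mul]
      calc 2 ^ (PySem.Int.mod n0 12).toNat < 2 ^ 12 := Nat.pow_lt_pow_right (by norm_num) this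
        _ = 4096 := by norm_num
    have hrlt : r < 12 := by
      have h1 := PySem.Int.mod_nonneg m (b := 12) (by norm_num)
      have h2 := PySem.Int.mod_lt m (b := 12) (by norm_num)
      omega
    have hmaskbit : ∀ i : Nat, mask.testBit i
        = ((n0 :: rest).any (fun n => decide ((PySem.Int.mod n 12).toNat = i))) := by
      intro i
      rw [hmaskdef, fold_mask_testBit, List.any_cons]
      rw [Nat.shiftLeft_eq, one_mul, Nat.testBit_two_pow]
    -- bit i of rotated ↔ some note has interval i
    have hrotbit : ∀ i : Nat, i < 12 →
        (rotated.testBit i = true ↔ ∃ n ∈ n0 :: rest, f n = (i : Int)) := by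
      intro i hi
      rw [hrotdef, rotate_testBit mask r i hmasklt hrlt hi, hmaskbit, List.any_eq_true]
      constructor
      · rintro ⟨n, hn, hb⟩
        have hb' : (PySem.Int.mod n 12).toNat = (i + r) % 12 := by simpa using hb
        rw [hrdef] at hb'
        exact ⟨n, hn, (interval_class n m i hi).mpr hb'⟩
      · rintro ⟨n, hn, hb⟩
        have hb' := (interval_class n m i hi).mp hb
        rw [← hrdef] at hb'
        exact ⟨n, hn, by simpa using hb'⟩
    -- B's list via the filter characterisation
    have hrotlt : rotated < 4096 := by
      rw [hrotdef]
      have : ((mask >>> r ||| mask <<< (12 - r)) &&& 4095) ≤ 4095 := Nat.and_le_right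
      omega
    rw [stripBits_eq_filter rotated hrotlt]
    set LB := ((List.range 12).filter (fun i => rotated.testBit i)).map Int.ofNat with hLBdef
    -- A's set
    have hA : (PySem.List.sorted (n0 :: rest) (fun x => x) false).foldl
        (fun s note => PySem.Set.add s (PySem.Int.mod (note - m) 12)) PySem.Set.empty
        = PySem.Set.ofList ((PySem.List.sorted (n0 :: rest) (fun x => x) false).map f) := by
      rw [PySem.Set.ofList_eq_foldl, List.foldl_map]
      rfl
    rw [hA]
    -- membership characterisations
    have hmemLB : ∀ i : Int, i ∈ LB ↔ ∃ n ∈ n0 :: rest, f n = i := by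
      intro i
      rw [hLBdef, List.mem_map]
      constructor
      · rintro ⟨j, hj, rfl⟩
        obtain ⟨hjr, hjb⟩ := List.mem_filter.mp hj
        exact (hrotbit j (List.mem_range.mp hjr)).mp (by simpa using hjb)
      · rintro ⟨n, hn, hfn⟩
        have h0 : 0 ≤ i := hfn ▸ (hf n).1
        have h12 : i < 12 := hfn ▸ (hf n).2
        refine ⟨i.toNat, List.mem_filter.mpr ⟨List.mem_range.mpr (by omega), ?_⟩, by simpa using Int.toNat_of_nonneg h0⟩
        have : ((i.toNat : Int)) = i := by omega
        simpa using (hrotbit i.toNat (by omega)).mpr ⟨n, hn, by rw [this]; exact hfn⟩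
    have hmemS : ∀ i : Int,
        i ∈ PySem.Set.ofList ((PySem.List.sorted (n0 :: rest) (fun x => x) false).map f)
          ↔ ∃ n ∈ n0 :: rest, f n = i := by
      intro i
      rw [PySem.Set.mem_ofList _ i, List.mem_map]
      constructor
      · rintro ⟨n, hn, hfn⟩; exact ⟨n, (PySem.List.mem_sorted _ _ _ n).mp hn, hfn⟩
      · rintro ⟨n, hn, hfn⟩; exact ⟨n, (PySem.List.mem_sorted _ _ _ n).mpr hn, hfn⟩
    -- LB is strictly increasing
    have hpwLB : LB.Pairwise (fun a b : Int => a < b) := by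
      rw [hLBdef]
      refine List.Pairwise.map Int.ofNat (fun a b h => by exact_mod_cast h) ?_
      exact List.Pairwise.sublist List.filter_sublist (List.pairwise_lt_range.imp (fun h => Int.ofNat_lt.mpr h))
    have hndLB : LB.Nodup := hpwLB.imp ne_of_lt
    have hndS : (PySem.Set.ofList ((PySem.List.sorted (n0 :: rest) (fun x => x) false).map f)).Nodup :=
      PySem.Set.nodup_ofList _
    have hperm : LB.Perm (PySem.Set.ofList ((PySem.List.sorted (n0 :: rest) (fun x => x) false).map f)) := by
      apply List.perm_of_nodup_nodup_toFinset_eq hndLB hndS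
      ext i
      simp only [List.mem_toFinset]
      rw [hmemLB, hmemS]
    exact PySem.List.sorted_eq_of_perm_of_pairwise_lt _ LB _ hperm hpwLB
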